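-- pv_equiv track=rewrite | github.com/mquintiero/aoc-2024 | day25/part1.py | lockHeights
-- ===== SOURCE A (Python) =====
-- def lockHeights(schematic):
--     heights = [0] * len(schematic[0])
--     for j in range(len(schematic[0])):
--         i = 1
--         while (i < len(schematic) and schematic[i][j] != '.'):
--             heights[j] += 1
--             i += 1
--     return heights
-- ===== SOURCE B (Python) =====
-- def lockHeights(schematic):
--     width = len(schematic[0])
--     heights = [0] * width
--     done = [False] * width
--     for row in schematic[1:]:
--         for j in range(width):
--             if not done[j]:
--                 if row[j] == '.':
--                     done[j] = True
--                 else: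
--                     heights[j] += 1
--     return heights
-- ===== Notes on version B (the rewrite author's own statement) =====
-- stated objective: alternative
-- what changed: Reverses the loop nesting: instead of a per-column while scan with repeated row indexing, B makes a single row-major pass over the rows, maintaining parallel heights and done-flag arrays for all columns at once.
-- outside the precondition, e.g. on lockHeights(['##', '..', '#']): A returns [0, 0], B returns [0, 0]
import Mathlib
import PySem

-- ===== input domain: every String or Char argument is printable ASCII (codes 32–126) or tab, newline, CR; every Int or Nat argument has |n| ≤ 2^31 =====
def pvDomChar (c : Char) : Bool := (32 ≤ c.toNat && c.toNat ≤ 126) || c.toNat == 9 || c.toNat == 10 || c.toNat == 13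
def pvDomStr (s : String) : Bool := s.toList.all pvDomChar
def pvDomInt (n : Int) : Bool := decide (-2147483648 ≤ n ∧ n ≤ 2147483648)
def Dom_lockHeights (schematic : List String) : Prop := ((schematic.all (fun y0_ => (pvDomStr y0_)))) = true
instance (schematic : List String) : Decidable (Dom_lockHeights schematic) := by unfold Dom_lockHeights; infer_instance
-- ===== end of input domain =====

-- B replaces A's per-column while-scan by a single row-major pass over the rows,
-- maintaining parallel heights/done arrays for all columns at once (alternative decomposition, same cost).

-- ===== PORT A =====
-- the inner 'while i < len(schematic) and schematic[i][j] != '.'' loop of A;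
-- inside Pre_ every access schematic[i][j] is in range, so '.toList.getD j '.'' is the exact char
def pvColA (schematic : List String) (j : Nat) (i : Nat) (h : Int) : Int :=
  if hi : i < schematic.length then
    if schematic[i].toList.getD j '.' ≠ '.' then
      pvColA schematic j (i + 1) (h + 1)
    else h
  else h
termination_by schematic.length - i

def lockHeights (schematic : List String) : List Int :=
  (List.range (schematic.headD "").length).map (fun j => pvColA schematic j 1 0)

-- ===== PORT B =====
-- inner 'for j in range(width)' loop of B over the parallel (heights, done) state;
-- j tracks the column index, row[j] is in range inside Pre_
def pvRowStep (row : String) : Nat → List (Int × Bool) → List (Int × Bool)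
  | _, [] => []
  | j, (h, d) :: rest =>
    (if d then (h, d)
     else if row.toList.getD j '.' = '.' then (h, true) else (h + 1, false)) :: pvRowStep row (j + 1) rest

def lockHeights_alt (schematic : List String) : List Int :=
  let width := (schematic.headD "").length
  (((schematic.drop 1).foldl (fun st row => pvRowStep row 0 st)
      (List.replicate width ((0 : Int), false))).map Prod.fst)

-- ===== PRECONDITION & SPEC =====
-- Pre_ excludes inputs where Python A raises IndexError: the empty list (schematic[0]) and grids
-- with a row shorter than row 0 (schematic[i][j]); it also excludes some ragged grids on which A
-- happens to return because every short row is only reached after a '.' stopped each missing column.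
def Pre_lockHeights (schematic : List String) : Prop :=
  schematic ≠ [] ∧ ∀ s ∈ schematic, (schematic.headD "").length ≤ s.length
instance (schematic : List String) : Decidable (Pre_lockHeights schematic) := by
  unfold Pre_lockHeights; infer_instance

def pvWitness_lockHeights : List String := ["##", ".#", "##"]

def Spec_lockHeights (schematic : List String) (out : List Int) : Prop := out = lockHeights_alt schematic
instance (schematic : List String) (out : List Int) : Decidable (Spec_lockHeights schematic out) := by unfold Spec_lockHeights; infer_instance

-- ===== CLAIM (what is proved, stated in full; the proofs are below) =====
def Claim_equal_lockHeights : Prop := ∀ (schematic : List String), Dom_lockHeights schematic → Pre_lockHeights schematic → Spec_lockHeights schematic (lockHeights schematic)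

-- ===== LEMMAS AND PROOFS =====

-- per-column scalar step of B
def pvG (row : String) (j : Nat) (p : Int × Bool) : Int × Bool :=
  if p.2 then p else if row.toList.getD j '.' = '.' then (p.1, true) else (p.1 + 1, false)

theorem pvRowStep_map_range' (row : String) (n : Nat) :
    ∀ (j : Nat) (s : Nat → Int × Bool),
      pvRowStep row j ((List.range' j n).map s) = (List.range' j n).map (fun k => pvG row k (s k)) := by
  induction n with
  | zero => intro j s; simp [pvRowStep]
  | succ n ih =>
    intro j s
    simp only [List.range'_succ, List.map_cons, pvRowStep, pvG]
    cases s j with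
    | mk h d => exact congrArg _ (ih (j + 1) s)

theorem foldl_pvRowStep_map_range (rows : List String) (w : Nat) :
    ∀ (s : Nat → Int × Bool),
      rows.foldl (fun st row => pvRowStep row 0 st) ((List.range w).map s)
        = (List.range w).map (fun j => rows.foldl (fun p row => pvG row j p) (s j)) := by
  induction rows with
  | nil => intro s; simp
  | cons r rs ih =>
    intro s
    simp only [List.foldl_cons]
    rw [List.range_eq_range', pvRowStep_map_range' r w 0 s, ← List.range_eq_range', ih]

theorem foldl_pvG_done (rows : List String) (j : Nat) (h : Int) :
    rows.foldl (fun p row => pvG row j p) (h, true) = (h, true) := by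
  induction rows with
  | nil => rfl
  | cons r rs ih => simpa [pvG] using ih

theorem pvColA_eq_foldl (schematic : List String) (j : Nat) :
    ∀ (i : Nat) (h : Int),
      pvColA schematic j i h = ((schematic.drop i).foldl (fun p row => pvG row j p) (h, false)).1 := by
  intro i
  induction hn : schematic.length - i using Nat.strong_induction_on generalizing i with
  | _ n ih =>
    intro h
    rw [pvColA]
    by_cases hi : i < schematic.length
    · rw [List.drop_eq_getElem_cons hi]
      simp only [hi, dif_pos, List.foldl_cons]
      by_cases hc : schematic[i].toList.getD j '.' = '.'
      · have hc' : schematic[i].toList[j]?.getD '.' = '.' := by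
          simpa [List.getD_eq_getElem?_getD] using hc
        have hstep : pvG schematic[i] j (h, false) = (h, true) := by simp [pvG, hc']
        simp [hstep, foldl_pvG_done, hc']
      · have hlt : schematic.length - (i + 1) < n := by omega
        simp only [List.getD_eq_getElem?_getD] at hc
        rw [ih _ hlt (i + 1) rfl (h + 1)]
        simp [pvG, hc]
    · simp [hi, List.drop_eq_nil_of_le (by omega : schematic.length ≤ i)]

theorem lockHeights_eq (schematic : List String) :
    lockHeights schematic = lockHeights_alt schematic := by
  unfold lockHeights lockHeights_alt
  simp only []
  have hrep : List.replicate ((schematic.headD "").length) ((0 : Int), false)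
      = (List.range ((schematic.headD "").length)).map (fun _ => ((0 : Int), false)) := by
    simp [List.map_const']
  rw [hrep, foldl_pvRowStep_map_range, List.map_map]
  refine List.map_congr_left ?_
  intro j _
  simp [Function.comp, pvColA_eq_foldl schematic j 1 0]

-- ===== VERDICT (by name: the statement is the Claim_ definition above) =====
theorem lockHeights_spec : Claim_equal_lockHeights := by
  intro schematic _ _
  exact lockHeights_eq schematic
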